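-- pv_equiv track=rewrite | github.com/KornkamonS/Fuzzi_test | Ver2/fuzzyInterval.py | FRforYL
-- ===== SOURCE A (Python) =====
-- def FRforYL ( output, L) :
--     fr = []
--     i = 0
--     for out in output :
--         if i <= L :
--             fr.append( out[0] )
--         else :
--             fr.append( out[1] )
--         i = i + 1
--     return fr
-- ===== SOURCE B (Python) =====
-- def FRforYL(output, L):
--     if not output:
--         return []
--     if L < 0:
--         return [o[1] for o in output]
--     return [output[0][0]] + FRforYL(output[1:], L - 1)
-- ===== Notes on version B (the rewrite author's own statement) =====
-- stated objective: alternative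
-- what changed: Replaces A's single indexed loop (per-element i<=L test with an incrementing counter) by structural recursion that counts L down and, once L goes negative, finishes with one uniform map of second components over the remaining tail.
import Mathlib
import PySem

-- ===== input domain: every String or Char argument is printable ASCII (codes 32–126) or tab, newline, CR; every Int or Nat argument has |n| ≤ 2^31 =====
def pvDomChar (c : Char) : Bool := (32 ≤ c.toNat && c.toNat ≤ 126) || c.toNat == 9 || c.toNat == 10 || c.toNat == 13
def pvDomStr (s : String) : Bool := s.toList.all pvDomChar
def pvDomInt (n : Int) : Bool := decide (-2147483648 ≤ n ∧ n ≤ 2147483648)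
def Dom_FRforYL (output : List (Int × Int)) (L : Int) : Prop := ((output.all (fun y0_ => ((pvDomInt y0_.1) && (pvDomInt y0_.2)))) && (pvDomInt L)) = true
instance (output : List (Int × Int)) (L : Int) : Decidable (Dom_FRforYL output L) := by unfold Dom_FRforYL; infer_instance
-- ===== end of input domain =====

-- B replaces A's indexed loop by structural recursion counting L down, switching to a uniform tail map of second components once L < 0 (alternative decomposition).


-- ===== PORT A =====
-- literal port of A: fold over output carrying (fr, i)
def FRforYL (output : List (Int × Int)) (L : Int) : List Int :=
  (output.foldl (fun (st : List Int × Int) out =>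
    (st.1 ++ [if st.2 <= L then out.1 else out.2], st.2 + 1)) ([], 0)).1

-- ===== PORT B =====
-- port of B: structural recursion counting L down; once L < 0, one uniform map of second components
def FRforYL_alt (output : List (Int × Int)) (L : Int) : List Int :=
  match output with
  | [] => []
  | o :: rest =>
    if L < 0 then (o :: rest).map Prod.snd
    else [o.1] ++ FRforYL_alt rest (L - 1)

-- ===== PRECONDITION & SPEC =====
def Spec_FRforYL (output : List (Int × Int)) (L : Int) (out : List Int) : Prop := out = FRforYL_alt output L
instance (output : List (Int × Int)) (L : Int) (out : List Int) : Decidable (Spec_FRforYL output L out) := by unfold Spec_FRforYL; infer_instance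

-- ===== CLAIM (what is proved, stated in full; the proofs are below) =====
def Claim_equal_FRforYL : Prop := ∀ (output : List (Int × Int)) (L : Int), Dom_FRforYL output L → Spec_FRforYL output L (FRforYL output L)

-- ===== LEMMAS AND PROOFS =====
-- A's loop from counter i equals B's recursion at threshold L - i
theorem FRforYL_loop (L : Int) (xs : List (Int × Int)) : ∀ (acc : List Int) (i : Int),
    (xs.foldl (fun (st : List Int × Int) out =>
      (st.1 ++ [if st.2 <= L then out.1 else out.2], st.2 + 1)) (acc, i)).1 =
    acc ++ FRforYL_alt xs (L - i) := by
  induction xs with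
  | nil => intro acc i; simp [FRforYL_alt]
  | cons x xs ih =>
    intro acc i
    by_cases h : i <= L
    · have h' : ¬ (L - i < 0) := by omega
      have h2 : L - (i + 1) = (L - i) - 1 := by omega
      simp only [List.foldl_cons, if_pos h, ih, FRforYL_alt, if_neg h', h2]
      simp
    · -- once i > L every remaining step appends out.2; prove the tail is the map
      have h' : L - i < 0 := by omega
      simp only [List.foldl_cons, if_neg h, FRforYL_alt, if_pos h']
      rw [ih]
      have h2 : L - (i + 1) < 0 := by omega
      have htail : FRforYL_alt xs (L - (i + 1)) = xs.map Prod.snd := by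
        cases xs with
        | nil => simp [FRforYL_alt]
        | cons y ys => simp only [FRforYL_alt, if_pos h2]
      rw [htail]; simp

-- ===== VERDICT (by name: the statement is the Claim_ definition above) =====
theorem FRforYL_spec : Claim_equal_FRforYL := by
  intro output L _
  unfold Spec_FRforYL FRforYL
  rw [FRforYL_loop]
  simp
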